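-- pv_equiv track=rewrite | github.com/shishirgupta1978/test | backend/alt_text_generator/alt_text_prediction.py | remove_from_end
-- ===== SOURCE A (Python) =====
-- def remove_from_end(string):
--     conjunctions = ['and', 'or', 'but', 'nor', 'for', 'yet', 'so', 'are', 'of', 'a', 'an', 'the', 'that', 'this']
--     words = string.split()
--
--     # Iterate over the words from the end of the string
--     for i in range(len(words) - 1, 0, -1):
--         if words[i].lower() not in conjunctions:
--             break  # Stop when a non-conjunction word is found
--         else:
--             words.pop(i)  # Remove the conjunction word
--
--     return ' '.join(words)
-- ===== SOURCE B (Python) =====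
-- def remove_from_end(string):
--     conjunctions = {'and', 'or', 'but', 'nor', 'for', 'yet', 'so', 'are', 'of',
--                     'a', 'an', 'the', 'that', 'this'}
--     words = string.split()
--     last = -1
--     for i, w in enumerate(words):
--         if w.lower() not in conjunctions:
--             last = i
--     # word 0 is never stripped (A's loop stops at index 1), hence the max(..., 1)
--     return ' '.join(words[:max(last + 1, 1)])
-- ===== Notes on version B (the rewrite author's own statement) =====
-- stated objective: alternative
-- what changed: Single forward pass with enumerate recording the last non-conjunction index into a set-membership test, then one slice words[:max(last+1,1)], instead of scanning backwards from the end with break and popping elements in place.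
import Mathlib
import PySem

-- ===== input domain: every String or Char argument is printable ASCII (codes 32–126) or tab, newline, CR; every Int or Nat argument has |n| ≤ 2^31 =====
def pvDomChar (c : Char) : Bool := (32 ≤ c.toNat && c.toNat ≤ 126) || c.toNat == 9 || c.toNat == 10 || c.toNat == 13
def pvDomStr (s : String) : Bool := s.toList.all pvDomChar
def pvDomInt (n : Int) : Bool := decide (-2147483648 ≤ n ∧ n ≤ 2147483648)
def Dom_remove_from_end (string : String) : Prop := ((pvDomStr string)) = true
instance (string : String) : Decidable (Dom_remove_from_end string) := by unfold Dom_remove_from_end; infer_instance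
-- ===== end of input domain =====

-- B replaces A's backward scan-with-break that pops trailing conjunction words in place by a
-- single forward enumerate pass recording the last non-conjunction index plus one slice
-- (alternative decomposition, same cost).

-- the conjunction literals (same literals in both Pythons; A has them as a list, B as a set)
def pvConj : List String :=
  ["and", "or", "but", "nor", "for", "yet", "so", "are", "of", "a", "an", "the", "that", "this"]

-- ===== PORT A =====
-- A's loop 'for i in range(len(words)-1, 0, -1)': i counts down from len-1 to 1; the pattern
-- 'i+1' is the current Python index.  'words.pop(i)' at the in-range index i is eraseIdx i
-- (PySem.List.pop? words i = some (words[i], words.eraseIdx i) there).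
def pvLoopA : Nat → List String → List String
  | 0, words => words
  | (i+1), words =>
      if ¬ pvConj.contains (PySem.Str.lower (PySem.List.pyGetD words ((i+1 : Nat) : Int) "")) then
        words                              -- break
      else
        pvLoopA i (words.eraseIdx (i+1))   -- words.pop(i), continue with i-1

def remove_from_end (string : String) : String :=
  let words := PySem.Str.split₀ string
  PySem.Str.join " " (pvLoopA (words.length - 1) words)

-- ===== PORT B =====
def remove_from_end_alt (string : String) : String :=
  let words := PySem.Str.split₀ string
  let last : Int :=
    (PySem.List.enumerate words 0).foldl
      (fun last p =>
        if ¬ PySem.Set.contains (PySem.Set.ofList pvConj) (PySem.Str.lower p.2) then p.1 else last)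
      (-1)
  PySem.Str.join " " (PySem.List.slice words none (some (max (last + 1) 1)))

-- ===== PRECONDITION & SPEC =====
def Spec_remove_from_end (string : String) (out : String) : Prop := out = remove_from_end_alt string
instance (string : String) (out : String) : Decidable (Spec_remove_from_end string out) := by unfold Spec_remove_from_end; infer_instance

-- ===== CLAIM (what is proved, stated in full; the proofs are below) =====
def Claim_equal_remove_from_end : Prop := ∀ (string : String), Dom_remove_from_end string → Spec_remove_from_end string (remove_from_end string)

-- ===== LEMMAS AND PROOFS =====

def pvIsConj (x : String) : Bool := pvConj.contains (PySem.Str.lower x)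

-- length of the trailing run of conjunction words
def pvT (w : List String) : Nat := (w.reverse.takeWhile pvIsConj).length

theorem pvT_le (w : List String) : pvT w ≤ w.length := by
  have := (List.takeWhile_sublist (p := pvIsConj) (l := w.reverse)).length_le
  simpa [pvT] using this

theorem pvT_append (w : List String) (x : String) :
    pvT (w ++ [x]) = if pvIsConj x then pvT w + 1 else 0 := by
  simp [pvT, List.takeWhile]
  split_ifs with h <;> simp [h]

theorem pvLoopA_eq (w : List String) :
    pvLoopA (w.length - 1) w = w.take (max (w.length - pvT w) 1) := by
  induction w using List.reverseRecOn with
  | nil => simp [pvLoopA]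
  | append_singleton ys x ih =>
    rcases ys with _ | ⟨y, ys'⟩
    · -- single word: index 0, loop body never runs
      simp [pvLoopA]
    · set ys : List String := y :: ys' with hys
      have hlen : (ys ++ [x]).length - 1 = (ys.length - 1) + 1 := by
        simp [hys]
      have hget : PySem.List.pyGetD (ys ++ [x]) (((ys.length - 1) + 1 : Nat) : Int) "" = x := by
        have : (ys.length - 1) + 1 = ys.length := by simp [hys]
        rw [this, PySem.List.pyGetD_natCast]
        simp
      rw [hlen]
      by_cases hc : pvIsConj x
      · have herase : (ys ++ [x]).eraseIdx ((ys.length - 1) + 1) = ys := by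
          have : (ys.length - 1) + 1 = ys.length := by simp [hys]
          rw [this, List.eraseIdx_append_of_length_le (le_refl _)]
          simp
        have hTy := pvT_le ys
        have hy1 : 1 ≤ ys.length := by simp [hys]
        simp only [pvLoopA, hget]
        rw [if_neg (by simpa [pvIsConj] using hc), herase, ih, pvT_append, if_pos hc]
        have harith : (ys ++ [x]).length - (pvT ys + 1) = ys.length - pvT ys := by
          simp
        rw [harith, List.take_append_of_le_length (by omega : max (ys.length - pvT ys) 1 ≤ ys.length)]
      · simp only [pvLoopA, hget]
        rw [if_pos (by simpa [pvIsConj] using hc)]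
        rw [pvT_append, if_neg hc]
        have : max ((ys ++ [x]).length - 0) 1 = (ys ++ [x]).length := by
          simp [hys]
        rw [this, List.take_length]

theorem pvSetContains (x : String) :
    PySem.Set.contains (PySem.Set.ofList pvConj) x = pvConj.contains x := by
  have h : PySem.Set.ofList pvConj = pvConj := by decide
  rw [h, PySem.Set.contains_eq_listContains]

theorem pvFold_eq (w : List String) :
    (PySem.List.enumerate w 0).foldl
        (fun last p =>
          if ¬ PySem.Set.contains (PySem.Set.ofList pvConj) (PySem.Str.lower p.2) then p.1 else last)
        (-1)
      = (w.length : Int) - pvT w - 1 := by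
  induction w using List.reverseRecOn with
  | nil => simp [PySem.List.enumerate, pvT]
  | append_singleton ys x ih =>
    rw [PySem.List.enumerate_append, List.foldl_append, ih]
    simp only [PySem.List.enumerate, List.foldl, pvSetContains]
    rw [pvT_append]
    by_cases hc : pvIsConj x
    · have : ¬ (¬ pvConj.contains (PySem.Str.lower x) = true) := by
        simpa [pvIsConj] using hc
      rw [if_neg this, if_pos hc]
      simp [List.length_append]
    · rw [if_pos (by simpa [pvIsConj] using hc), if_neg hc]
      simp

-- ===== VERDICT (by name: the statement is the Claim_ definition above) =====
theorem remove_from_end_spec : Claim_equal_remove_from_end := by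
  intro s _
  unfold Spec_remove_from_end remove_from_end remove_from_end_alt
  dsimp only
  set w := PySem.Str.split₀ s with hw
  rw [pvFold_eq, pvLoopA_eq]
  congr 1
  have hT := pvT_le w
  have h1 : (0 : Int) ≤ max ((w.length : Int) - pvT w - 1 + 1) 1 := by omega
  rw [PySem.List.slice_to _ h1]
  congr 1
  omega
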